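-- pv_equiv track=rewrite | github.com/YohannPanthakee/3D-FEM | Python/Augmentation.py | sub1_split
-- ===== SOURCE A (Python) =====
-- def sub1_split(nested_list):
-- 	"""
-- 	Takes in a nested list and iterates though the list and subtracts 1 from each element
-- 	then using the modified elements builds a new nested list
-- 	@params:
-- 		nested_list - the nested list to be edited (Int)
-- 	"""
--
-- 	matrix = []
-- 	modified = []
-- 	original = []
--
-- 	for layer in nested_list:
-- 		for elem in layer:
-- 			new = elem -1
-- 			old = elem
-- 			modified.append(new)
-- 			original.append(old)
--
-- 	con1 = [modified[i] for i in list(range(0,len(modified),2))]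
-- 	con2 = [modified[i] for i in list(range(1,len(modified)+1,2))]
--
-- 	orig1 = [original[i] for i in list(range(0,len(original),2))]
-- 	orig2 = [original[i] for i in list(range(1,len(original)+1,2))]
--
-- 	for i,ii in zip(con1,con2):
-- 		matrix.append([i,ii])
--
-- 	return matrix, orig1, orig2
-- ===== SOURCE B (Python) =====
-- def sub1_split(nested_list):
--     ev_m, od_m, orig1, orig2 = [], [], [], []
--     even = True
--     for layer in nested_list:
--         for elem in layer:
--             if even:
--                 ev_m.append(elem - 1)
--                 orig1.append(elem)
--             else:
--                 od_m.append(elem - 1)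
--                 orig2.append(elem)
--             even = not even
--     matrix = [[a, b] for a, b in zip(ev_m, od_m)]
--     return matrix, orig1, orig2
-- ===== Notes on version B (the rewrite author's own statement) =====
-- stated objective: simpler
-- what changed: One routing pass with a parity flag fills the four output buckets directly and zips them, replacing A's flatten-into-two-lists followed by four stride-indexed comprehensions.
import Mathlib
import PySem

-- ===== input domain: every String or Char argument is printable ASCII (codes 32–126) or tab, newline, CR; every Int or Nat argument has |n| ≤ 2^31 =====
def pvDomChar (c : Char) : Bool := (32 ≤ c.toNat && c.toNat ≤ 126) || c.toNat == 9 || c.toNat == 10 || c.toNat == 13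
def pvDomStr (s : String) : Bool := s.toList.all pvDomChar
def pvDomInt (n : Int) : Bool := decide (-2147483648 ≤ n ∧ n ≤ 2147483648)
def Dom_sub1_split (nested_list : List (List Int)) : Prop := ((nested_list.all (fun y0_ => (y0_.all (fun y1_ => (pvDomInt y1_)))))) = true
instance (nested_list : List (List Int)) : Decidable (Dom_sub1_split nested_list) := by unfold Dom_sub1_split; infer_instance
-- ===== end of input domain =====

-- B replaces A's flatten-into-two-lists + four stride-indexed comprehensions by a single
-- parity-routing pass into four buckets (objective: simpler).

-- ===== PORT A =====
-- literal port: the one nested loop appends to (modified, original); the four comprehensions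
-- index with pyGetD (default 0 is never read inside Pre_: on an odd total count Python's
-- 'modified[len]' raises IndexError, which Pre_sub1_split excludes).
def sub1_split (nested_list : List (List Int)) : List (List Int) × List Int × List Int :=
  let mo := nested_list.foldl
    (fun (p : List Int × List Int) layer =>
      layer.foldl (fun (q : List Int × List Int) elem => (q.1 ++ [elem - 1], q.2 ++ [elem])) p)
    ([], [])
  let modified := mo.1
  let original := mo.2
  let con1 := (PySem.List.pyRange 0 (modified.length : Int) 2).map
      (fun i => PySem.List.pyGetD modified i 0)
  let con2 := (PySem.List.pyRange 1 ((modified.length : Int) + 1) 2).map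
      (fun i => PySem.List.pyGetD modified i 0)
  let orig1 := (PySem.List.pyRange 0 (original.length : Int) 2).map
      (fun i => PySem.List.pyGetD original i 0)
  let orig2 := (PySem.List.pyRange 1 ((original.length : Int) + 1) 2).map
      (fun i => PySem.List.pyGetD original i 0)
  let matrix := (con1.zip con2).foldl (fun m p => m ++ [[p.1, p.2]]) []
  (matrix, orig1, orig2)

-- ===== PORT B =====
-- one element step of B's routing pass: state = (ev_m, od_m, orig1, orig2, even-flag)
def pvStepB (s : List Int × List Int × List Int × List Int × Bool) (elem : Int) :
    List Int × List Int × List Int × List Int × Bool :=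
  match s with
  | (evm, odm, o1, o2, even) =>
    if even then (evm ++ [elem - 1], odm, o1 ++ [elem], o2, false)
    else (evm, odm ++ [elem - 1], o1, o2 ++ [elem], true)

def sub1_split_alt (nested_list : List (List Int)) : List (List Int) × List Int × List Int :=
  match nested_list.foldl (fun s layer => layer.foldl pvStepB s) ([], [], [], [], true) with
  | (evm, odm, o1, o2, _) => ((evm.zip odm).map (fun p => [p.1, p.2]), o1, o2)

-- ===== PRECONDITION & SPEC =====
-- Pre_ excludes exactly the inputs with an odd total number of elements: there Python's
-- comprehension 'modified[i] for i in range(1, len(modified)+1, 2)' reads index len and raises IndexError.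
def Pre_sub1_split (nested_list : List (List Int)) : Prop :=
  nested_list.flatten.length % 2 = 0
instance (nested_list : List (List Int)) : Decidable (Pre_sub1_split nested_list) := by
  unfold Pre_sub1_split; infer_instance

def pvWitness_sub1_split : List (List Int) := [[1, 2], [3, 4]]

def Spec_sub1_split (nested_list : List (List Int)) (out : List (List Int) × List Int × List Int) : Prop := out = sub1_split_alt nested_list
instance (nested_list : List (List Int)) (out : List (List Int) × List Int × List Int) : Decidable (Spec_sub1_split nested_list out) := by unfold Spec_sub1_split; infer_instance

-- ===== CLAIM (what is proved, stated in full; the proofs are below) =====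
def Claim_equal_sub1_split : Prop := ∀ (nested_list : List (List Int)), Dom_sub1_split nested_list → Pre_sub1_split nested_list → Spec_sub1_split nested_list (sub1_split nested_list)

-- ===== LEMMAS AND PROOFS =====

-- alternate split: (elements at even flat positions, elements at odd flat positions)
def pvSplit {α : Type} : List α → List α × List α
  | [] => ([], [])
  | a :: l => (a :: (pvSplit l).2, (pvSplit l).1)

theorem pvSplit_map {α β : Type} (f : α → β) (l : List α) :
    pvSplit (l.map f) = ((pvSplit l).1.map f, (pvSplit l).2.map f) := by
  induction l with
  | nil => rfl
  | cons a l ih => simp [pvSplit, ih]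

theorem pvSplit_getD {α : Type} (l : List α) (d : α) :
    ((List.range ((l.length + 1) / 2)).map (fun k => l.getD (2 * k) d) = (pvSplit l).1) ∧
    ((List.range (l.length / 2)).map (fun k => l.getD (2 * k + 1) d) = (pvSplit l).2) := by
  induction l with
  | nil => simp [pvSplit]
  | cons a l ih =>
    constructor
    · have h2 : (l.length + 1 + 1) / 2 = l.length / 2 + 1 := by omega
      rw [List.length_cons, h2, List.range_succ_eq_map, List.map_cons, List.map_map]
      show _ :: _ = a :: (pvSplit l).2
      rw [← ih.2]
      refine congrArg₂ List.cons rfl ?_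
      apply List.map_congr_left
      intro k _
      show (a :: l).getD (2 * (k + 1)) d = l.getD (2 * k + 1) d
      have h3 : 2 * (k + 1) = (2 * k + 1) + 1 := by ring
      rw [h3, List.getD_cons_succ]
    · show _ = (pvSplit l).1
      rw [← ih.1, List.length_cons]
      apply List.map_congr_left
      intro k _
      rfl

-- the two stride comprehensions of A, as evens/odds of the list
theorem pvCon1_eq (l : List Int) :
    (PySem.List.pyRange 0 (l.length : Int) 2).map (fun i => PySem.List.pyGetD l i 0)
      = (pvSplit l).1 := by
  rw [PySem.List.pyRange_of_pos 0 (l.length : Int) (by norm_num), List.map_map]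
  have hcnt : (if (0:Int) < (l.length : Int) then ((((l.length : Int)) - 0 + 2 - 1) / 2).toNat else 0)
      = (l.length + 1) / 2 := by
    split_ifs with h <;> omega
  rw [hcnt, ← (pvSplit_getD l 0).1]
  apply List.map_congr_left
  intro k _
  have h4 : (0 : Int) + 2 * (k : Int) = ((2 * k : Nat) : Int) := by push_cast; ring
  show PySem.List.pyGetD l (0 + 2 * (k : Int)) 0 = l.getD (2 * k) 0
  rw [h4, PySem.List.pyGetD_natCast]

theorem pvCon2_eq (l : List Int) (h : l.length % 2 = 0) :
    (PySem.List.pyRange 1 ((l.length : Int) + 1) 2).map (fun i => PySem.List.pyGetD l i 0)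
      = (pvSplit l).2 := by
  rw [PySem.List.pyRange_of_pos 1 ((l.length : Int) + 1) (by norm_num), List.map_map]
  have hcnt : (if (1:Int) < ((l.length : Int) + 1) then ((((l.length : Int) + 1) - 1 + 2 - 1) / 2).toNat else 0)
      = l.length / 2 := by
    split_ifs with hlt <;> omega
  rw [hcnt, ← (pvSplit_getD l 0).2]
  apply List.map_congr_left
  intro k _
  have h4 : (1 : Int) + 2 * (k : Int) = ((2 * k + 1 : Nat) : Int) := by push_cast; ring
  show PySem.List.pyGetD l (1 + 2 * (k : Int)) 0 = l.getD (2 * k + 1) 0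
  rw [h4, PySem.List.pyGetD_natCast]

-- B's routing fold, characterized by pvSplit, for both flag values at once
theorem pvFoldB (l : List Int) :
    (∀ evm odm o1 o2 : List Int,
      l.foldl pvStepB (evm, odm, o1, o2, true)
        = (evm ++ ((pvSplit l).1.map (fun e => e - 1)), odm ++ ((pvSplit l).2.map (fun e => e - 1)),
           o1 ++ (pvSplit l).1, o2 ++ (pvSplit l).2, decide (l.length % 2 = 0))) ∧
    (∀ evm odm o1 o2 : List Int,
      l.foldl pvStepB (evm, odm, o1, o2, false)
        = (evm ++ ((pvSplit l).2.map (fun e => e - 1)), odm ++ ((pvSplit l).1.map (fun e => e - 1)),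
           o1 ++ (pvSplit l).2, o2 ++ (pvSplit l).1, !decide (l.length % 2 = 0))) := by
  induction l with
  | nil => simp [pvSplit]
  | cons a l ih =>
    have hpar : decide (l.length % 2 = 0) = !decide ((l.length + 1) % 2 = 0) := by
      by_cases h : l.length % 2 = 0
      · have h2 : ¬ ((l.length + 1) % 2 = 0) := by omega
        simp [h, h2]
      · have h2 : (l.length + 1) % 2 = 0 := by omega
        simp [h, h2]
    constructor
    · intro evm odm o1 o2
      rw [List.foldl_cons]
      show l.foldl pvStepB (evm ++ [a - 1], odm, o1 ++ [a], o2, false) = _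
      rw [ih.2]
      simp [pvSplit]
      exact hpar
    · intro evm odm o1 o2
      rw [List.foldl_cons]
      show l.foldl pvStepB (evm, odm ++ [a - 1], o1, o2 ++ [a], true) = _
      rw [ih.1]
      simp [pvSplit]
      exact hpar

-- ===== VERDICT (by name: the statement is the Claim_ definition above) =====
theorem sub1_split_spec : Claim_equal_sub1_split := by
  intro nl _ hpre
  unfold Spec_sub1_split sub1_split sub1_split_alt
  -- both nested folds are folds over the flattening
  have hA : nl.foldl
      (fun (p : List Int × List Int) layer =>
        layer.foldl (fun (q : List Int × List Int) elem => (q.1 ++ [elem - 1], q.2 ++ [elem])) p)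
      ([], [])
      = (nl.flatten.map (fun e => e - 1), nl.flatten) := by
    rw [← List.foldl_flatten,
        PySem.List.foldl_prod_mk (fun s e => s ++ [e - 1]) (fun s e => s ++ [e]) nl.flatten [] []]
    rw [PySem.List.foldl_append_singleton_eq_map (fun e => e - 1) nl.flatten [],
        PySem.List.foldl_append_singleton_eq_map (fun e => e) nl.flatten []]
    simp
  have hB : nl.foldl (fun s layer => layer.foldl pvStepB s) ([], [], [], [], true)
      = ((pvSplit nl.flatten).1.map (fun e => e - 1), (pvSplit nl.flatten).2.map (fun e => e - 1),
         (pvSplit nl.flatten).1, (pvSplit nl.flatten).2, decide (nl.flatten.length % 2 = 0)) := by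
    rw [← List.foldl_flatten, (pvFoldB nl.flatten).1]
    simp
  rw [hA, hB]
  unfold Pre_sub1_split at hpre
  generalize nl.flatten = fl at hpre ⊢
  have hpre' : (List.map (fun e => e - 1) fl).length % 2 = 0 := by
    simpa using hpre
  simp only [pvCon1_eq, pvCon2_eq _ hpre', pvCon2_eq _ hpre, pvSplit_map,
    PySem.List.foldl_append_singleton_eq_map (fun p : Int × Int => [p.1, p.2]), List.nil_append]
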